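-- pv_equiv track=rewrite | github.com/abinzach/structured-outputs | ai-extraction-system/src/extraction_engine.py | _group_fields_by_level
-- ===== SOURCE A (Python) =====
-- from typing import Dict, List, Any, Optional, Tuple
--
-- def _group_fields_by_level(extraction_order: List[str]) -> Dict[int, List[str]]:
--     """Group fields by their hierarchy level."""
--     levels = {}
--
--     for field in extraction_order:
--         level = field.count('.')
--         if level not in levels:
--             levels[level] = []
--         levels[level].append(field)
--
--     return levels
-- ===== SOURCE B (Python) =====
-- def _group_fields_by_level(extraction_order):
--     """Group fields by their hierarchy level (dot count): distinct levels in
--     first-appearance order, each mapped to the fields at that level via a filter pass."""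
--     keys = list(dict.fromkeys(f.count('.') for f in extraction_order))
--     return {k: [f for f in extraction_order if f.count('.') == k] for k in keys}
-- ===== Notes on version B (the rewrite author's own statement) =====
-- stated objective: alternative
-- what changed: Replaced the single-pass scatter-into-dict-buckets with a two-phase grouping: collect the distinct levels in first-appearance order with dict.fromkeys, then build each group by a filter comprehension over the input.
import Mathlib
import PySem

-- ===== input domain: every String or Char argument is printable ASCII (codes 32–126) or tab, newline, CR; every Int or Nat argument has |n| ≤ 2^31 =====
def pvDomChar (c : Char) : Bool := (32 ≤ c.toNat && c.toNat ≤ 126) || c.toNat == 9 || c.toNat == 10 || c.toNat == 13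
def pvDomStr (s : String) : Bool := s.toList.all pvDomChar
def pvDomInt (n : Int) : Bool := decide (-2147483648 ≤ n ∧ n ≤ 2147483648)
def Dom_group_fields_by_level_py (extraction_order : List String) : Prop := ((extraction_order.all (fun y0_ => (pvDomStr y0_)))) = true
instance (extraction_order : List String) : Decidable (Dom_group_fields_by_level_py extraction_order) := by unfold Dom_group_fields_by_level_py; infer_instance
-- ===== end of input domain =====

-- B groups by two phases (distinct levels in first-appearance order, then one filter pass per level)
-- instead of A's single scatter-into-buckets loop; alternative decomposition, not claimed faster.

-- ===== PORT A =====
-- levels = {}; for field: level = field.count('.'); if level not in levels: levels[level] = []; levels[level].append(field)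
def group_fields_by_level_py (extraction_order : List String) : List (Int × List String) :=
  (extraction_order.foldl
    (fun (levels : PySem.Dict Int (List String)) field =>
      let level : Int := (PySem.Str.count field "." : Nat)
      let levels := if levels.contains level then levels else levels.insert level []
      levels.modify level [] (fun l => l ++ [field]))
    PySem.Dict.empty).items

-- ===== PORT B =====
-- keys = list(dict.fromkeys(f.count('.') for f in extraction_order))
-- return {k: [f for f in extraction_order if f.count('.') == k] for k in keys}
def group_fields_by_level_py_alt (extraction_order : List String) : List (Int × List String) :=
  (PySem.List.dedup (extraction_order.map (fun f => ((PySem.Str.count f "." : Nat) : Int)))).map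
    (fun k => (k, extraction_order.filter (fun f => ((PySem.Str.count f "." : Nat) : Int) == k)))

-- ===== PRECONDITION & SPEC =====
def Spec_group_fields_by_level_py (extraction_order : List String) (out : List (Int × List String)) : Prop := out = group_fields_by_level_py_alt extraction_order
instance (extraction_order : List String) (out : List (Int × List String)) : Decidable (Spec_group_fields_by_level_py extraction_order out) := by unfold Spec_group_fields_by_level_py; infer_instance

-- ===== CLAIM (what is proved, stated in full; the proofs are below) =====
def Claim_equal_group_fields_by_level_py : Prop := ∀ (extraction_order : List String), Dom_group_fields_by_level_py extraction_order → Spec_group_fields_by_level_py extraction_order (group_fields_by_level_py extraction_order)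

-- ===== LEMMAS AND PROOFS =====

-- A's "if level not in levels: levels[level] = []" followed by append IS a single Dict.modify.
theorem pv_step_eq (d : PySem.Dict Int (List String)) (k : Int) (x : String) :
    (if d.contains k then d else d.insert k []).modify k [] (fun l => l ++ [x])
      = d.modify k [] (fun l => l ++ [x]) := by
  by_cases h : d.contains k
  · simp [h]
  · simp only [Bool.not_eq_true] at h
    simp only [h, Bool.false_eq_true, if_false, PySem.Dict.modify,
      PySem.Dict.getD_insert_self, PySem.Dict.insert_insert_self]
    rw [PySem.Dict.getD_of_not_contains]
    exact h

theorem pv_foldl_eq (extraction_order : List String) (d : PySem.Dict Int (List String)) :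
    (extraction_order.foldl
      (fun (levels : PySem.Dict Int (List String)) field =>
        let level : Int := (PySem.Str.count field "." : Nat)
        let levels := if levels.contains level then levels else levels.insert level []
        levels.modify level [] (fun l => l ++ [field])) d)
    = extraction_order.foldl
        (fun (levels : PySem.Dict Int (List String)) field =>
          levels.modify ((PySem.Str.count field "." : Nat) : Int) [] (fun l => l ++ [field])) d := by
  simp only [pv_step_eq]

-- projecting the second components back out of the pairing-then-filter pass
theorem pv_proj (key : String → Int) (k : Int) (xs : List String) :
    List.map (fun x => x.2) (List.filter (fun p => p.1 == k) (List.map (fun f => (key f, f)) xs))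
      = xs.filter (fun f => key f == k) := by
  induction xs with
  | nil => rfl
  | cons a t ih =>
    simp only [List.map_cons, List.filter_cons]
    by_cases h : (key a == k) = true
    · simp only [h, if_true, List.map_cons, ih]
    · simp only [h, Bool.false_eq_true, if_false, ih]

-- ===== VERDICT (by name: the statement is the Claim_ definition above) =====
theorem group_fields_by_level_py_spec : Claim_equal_group_fields_by_level_py := by
  intro xs _
  unfold Spec_group_fields_by_level_py group_fields_by_level_py group_fields_by_level_py_alt
  rw [pv_foldl_eq]
  set key : String → Int := fun f => ((PySem.Str.count f "." : Nat) : Int) with hkey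
  have hnd : (xs.foldl (fun (d : PySem.Dict Int (List String)) field =>
        d.modify (key field) [] (fun l => l ++ [field])) PySem.Dict.empty).keys.Nodup :=
    PySem.Dict.nodup_keys_foldl_modify_key xs key [] (fun _ x l => l ++ [x]) _
      PySem.Dict.nodup_keys_empty
  have hkeys : (xs.foldl (fun (d : PySem.Dict Int (List String)) field =>
        d.modify (key field) [] (fun l => l ++ [field])) PySem.Dict.empty).keys
      = PySem.List.dedup (xs.map key) := by
    rw [PySem.Dict.keys_foldl_modify_key xs key [] (fun _ x l => l ++ [x]) PySem.Dict.empty]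
    simp only [PySem.Dict.keys_empty, PySem.Set.update, PySem.List.dedup_eq_ofList,
      PySem.Set.ofList_eq_foldl]
  rw [PySem.Dict.items_eq_map_keys _ hnd [], hkeys]
  apply List.map_congr_left
  intro k _
  have hgd := PySem.Dict.getD_foldl_modify_append (xs.map (fun f => (key f, f)))
      PySem.Dict.empty k
  rw [List.foldl_map] at hgd
  rw [hgd, PySem.Dict.getD_empty, List.nil_append, pv_proj]
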